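-- pv_equiv track=rewrite | github.com/huggingface/accelerate | src/accelerate/test_utils/examples.py | get_function_contents_by_name
-- ===== SOURCE A (Python) =====
-- def get_function_contents_by_name(lines: list[str], name: str):
--     """
--     Extracts a function from `lines` of segmented source code with the name `name`.
--
--     Args:
--         lines (`List[str]`):
--             Source code of a script separated by line.
--         name (`str`):
--             The name of the function to extract. Should be either `training_function` or `main`
--     """
--     if name != "training_function" and name != "main":
--         raise ValueError(f"Incorrect function name passed: {name}, choose either 'main' or 'training_function'")
--     good_lines, found_start = [], False
--     for line in lines:
--         if not found_start and f"def {name}" in line: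
--             found_start = True
--             good_lines.append(line)
--             continue
--         if found_start:
--             if name == "training_function" and "def main" in line:
--                 return good_lines
--             if name == "main" and "if __name__" in line:
--                 return good_lines
--             good_lines.append(line)
-- ===== SOURCE B (Python) =====
-- def get_function_contents_by_name(lines: list[str], name: str):
--     if name != "training_function" and name != "main":
--         raise ValueError(f"Incorrect function name passed: {name}, choose either 'main' or 'training_function'")
--     needle = f"def {name}"
--     start = next((i for i, line in enumerate(lines) if needle in line), None)
--     if start is None:
--         return None
--     terminator = "def main" if name == "training_function" else "if __name__"
--     end = next((j for j in range(start + 1, len(lines)) if terminator in lines[j]), None)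
--     return lines[start:end] if end is not None else None
-- ===== Notes on version B (the rewrite author's own statement) =====
-- stated objective: simpler
-- what changed: Replaces the found_start flag and incremental good_lines accumulation with computing the start and terminator boundary indices and returning one slice.
import Mathlib
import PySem

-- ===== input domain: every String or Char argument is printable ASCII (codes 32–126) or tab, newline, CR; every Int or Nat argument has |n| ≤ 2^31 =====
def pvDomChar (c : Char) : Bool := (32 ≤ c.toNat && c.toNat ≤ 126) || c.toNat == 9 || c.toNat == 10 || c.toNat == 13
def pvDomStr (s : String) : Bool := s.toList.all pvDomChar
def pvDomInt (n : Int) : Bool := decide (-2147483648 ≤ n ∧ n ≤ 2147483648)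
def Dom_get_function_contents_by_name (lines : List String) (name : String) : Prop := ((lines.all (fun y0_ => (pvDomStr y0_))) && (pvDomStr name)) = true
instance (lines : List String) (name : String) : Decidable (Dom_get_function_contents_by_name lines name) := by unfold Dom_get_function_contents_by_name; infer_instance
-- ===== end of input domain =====

-- B replaces A's found_start flag and incremental good_lines accumulation with boundary-index
-- computation plus one slice (objective: simpler). Pre_ excludes names other than
-- "training_function"/"main", on which A raises ValueError (B raises it too).

-- ===== PORT A =====
-- the for-loop of A, state = (good_lines, found_start)
def pvALoop (name : String) (found : Bool) (good : List String) : List String → Option (List String)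
  | [] => none
  | line :: rest =>
    if !found && PySem.Str.isIn ("def " ++ name) line then
      pvALoop name true (good ++ [line]) rest
    else if found then
      if name == "training_function" && PySem.Str.isIn "def main" line then some good
      else if name == "main" && PySem.Str.isIn "if __name__" line then some good
      else pvALoop name found (good ++ [line]) rest
    else pvALoop name found good rest

def get_function_contents_by_name (lines : List String) (name : String) : Option (List String) :=
  pvALoop name false [] lines

-- ===== PORT B =====
def get_function_contents_by_name_alt (lines : List String) (name : String) : Option (List String) :=
  match lines.findIdx? (fun line => PySem.Str.isIn ("def " ++ name) line) with
  | none => none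
  | some start =>
    let terminator := if name == "training_function" then "def main" else "if __name__"
    match (lines.drop (start + 1)).findIdx? (fun line => PySem.Str.isIn terminator line) with
    | none => none
    | some j => some ((lines.take (start + 1 + j)).drop start)   -- lines[start : start+1+j]

-- ===== PRECONDITION & SPEC =====
-- A (and B) raise ValueError for any other name; exactly those inputs are excluded.
def Pre_get_function_contents_by_name (lines : List String) (name : String) : Prop :=
  name = "training_function" ∨ name = "main"
instance (lines : List String) (name : String) : Decidable (Pre_get_function_contents_by_name lines name) := by unfold Pre_get_function_contents_by_name; infer_instance

def pvWitness_get_function_contents_by_name : List String × String :=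
  (["def main():", "  pass", "if __name__ == '__main__':"], "main")

def Spec_get_function_contents_by_name (lines : List String) (name : String) (out : Option (List String)) : Prop := out = get_function_contents_by_name_alt lines name
instance (lines : List String) (name : String) (out : Option (List String)) : Decidable (Spec_get_function_contents_by_name lines name out) := by unfold Spec_get_function_contents_by_name; infer_instance

-- ===== CLAIM (what is proved, stated in full; the proofs are below) =====
def Claim_equal_get_function_contents_by_name : Prop := ∀ (lines : List String) (name : String), Dom_get_function_contents_by_name lines name → Pre_get_function_contents_by_name lines name → Spec_get_function_contents_by_name lines name (get_function_contents_by_name lines name)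

-- ===== LEMMAS AND PROOFS =====

-- one step of A's loop in the found state, for either admissible name: test the terminator, else append
theorem pvALoop_step_tf (good : List String) (hd : String) (t : List String) :
    pvALoop "training_function" true good (hd :: t) =
      if PySem.Str.isIn "def main" hd then some good
      else pvALoop "training_function" true (good ++ [hd]) t := by
  simp [pvALoop]

theorem pvALoop_step_main (good : List String) (hd : String) (t : List String) :
    pvALoop "main" true good (hd :: t) =
      if PySem.Str.isIn "if __name__" hd then some good
      else pvALoop "main" true (good ++ [hd]) t := by
  simp [pvALoop]

-- one step of A's loop in the not-found state: test the start needle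
theorem pvALoop_step_notfound (name : String) (good : List String) (hd : String) (t : List String) :
    pvALoop name false good (hd :: t) =
      if PySem.Str.isIn ("def " ++ name) hd then pvALoop name true (good ++ [hd]) t
      else pvALoop name false good t := by
  simp [pvALoop]

-- after the start line: A keeps appending until the terminator; B takes a prefix up to it
theorem pvALoop_found (name term : String)
    (hstep : ∀ good hd t, pvALoop name true good (hd :: t) =
      if PySem.Str.isIn term hd then some good else pvALoop name true (good ++ [hd]) t) :
    ∀ (rest good : List String), pvALoop name true good rest =
      match rest.findIdx? (fun line => PySem.Str.isIn term line) with
      | none => none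
      | some j => some (good ++ rest.take j) := by
  intro rest
  induction rest with
  | nil => intro good; simp [pvALoop]
  | cons hd t ih =>
    intro good
    rw [hstep, List.findIdx?_cons]
    by_cases hc : PySem.Str.isIn term hd = true
    · rw [if_pos hc, if_pos hc]; simp
    · rw [if_neg hc, if_neg hc, ih (good ++ [hd])]
      cases t.findIdx? (fun line => PySem.Str.isIn term line) <;> simp

-- the whole loop (not-found state, empty accumulator) equals B's two-index computation
theorem pvMain (name term : String)
    (hstep : ∀ good hd t, pvALoop name true good (hd :: t) =
      if PySem.Str.isIn term hd then some good else pvALoop name true (good ++ [hd]) t) :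
    ∀ lines : List String, pvALoop name false [] lines =
      match lines.findIdx? (fun line => PySem.Str.isIn ("def " ++ name) line) with
      | none => none
      | some start =>
        match (lines.drop (start + 1)).findIdx? (fun line => PySem.Str.isIn term line) with
        | none => none
        | some j => some ((lines.take (start + 1 + j)).drop start) := by
  intro lines
  induction lines with
  | nil => simp [pvALoop]
  | cons hd t ih =>
    rw [pvALoop_step_notfound, List.findIdx?_cons]
    by_cases hc : PySem.Str.isIn ("def " ++ name) hd = true
    · rw [if_pos hc, if_pos hc, pvALoop_found name term hstep t ([] ++ [hd])]
      simp only [Nat.zero_add, List.drop_one, List.tail_cons, List.drop_zero, List.nil_append]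
      cases t.findIdx? (fun line => PySem.Str.isIn term line) with
      | none => rfl
      | some j => simp [show 1 + j = j + 1 by ring, List.take_succ_cons]
    · rw [if_neg hc, if_neg hc, ih]
      cases t.findIdx? (fun line => PySem.Str.isIn ("def " ++ name) line) with
      | none => simp
      | some i =>
        simp only [Option.map_some, List.drop_succ_cons]
        cases (t.drop (i + 1)).findIdx? (fun line => PySem.Str.isIn term line) with
        | none => simp
        | some j =>
          simp only [Option.some.injEq]
          rw [show i + 1 + 1 + j = (i + 1 + j) + 1 by ring, List.take_succ_cons,
            List.drop_succ_cons]

-- ===== VERDICT (by name: the statement is the Claim_ definition above) =====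
theorem get_function_contents_by_name_spec : Claim_equal_get_function_contents_by_name := by
  intro lines name _ hpre
  unfold Spec_get_function_contents_by_name get_function_contents_by_name get_function_contents_by_name_alt
  rcases hpre with h | h <;> subst h
  · simpa using pvMain "training_function" "def main" pvALoop_step_tf lines
  · simpa using pvMain "main" "if __name__" pvALoop_step_main lines
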